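-- pv_equiv track=rewrite | github.com/nsg-ethz/mini_internet_project | platform/setup/_compute_independent_ext_links.py | compute_independent_links
-- ===== SOURCE A (Python) =====
-- def compute_independent_links(data):
--     # compute the independent link groups such that
--     # each group contains a set of links that can be processed in parallel
--     unique_container_groups = []
--     independent_link_groups = []
--     # find the first group that has not included any container in the current line
--     for ctn_a, ctn_b, throughput, delay in data:
--         can_join = False  # whether the current line can be joined to an existing group
--         for ctn_grp_id, ctn_group in enumerate(unique_container_groups):
--             if not (ctn_a in ctn_group or ctn_b in ctn_group):
--                 can_join = True
--                 ctn_group.add(ctn_a)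
--                 ctn_group.add(ctn_b)
--                 independent_link_groups[ctn_grp_id].append(
--                     (ctn_a, ctn_b, throughput, delay)
--                 )
--                 break
--         if not can_join:
--             # create a new group
--             unique_container_groups.append({ctn_a, ctn_b})
--             independent_link_groups.append([(ctn_a, ctn_b, throughput, delay)])
--
--     return independent_link_groups
-- ===== SOURCE B (Python) =====
-- def compute_independent_links(data):
--     # B: per-container dict of occupied group indices + mex, instead of scanning per-group container sets.
--     occupied = {}
--     independent_link_groups = []
--     for ctn_a, ctn_b, throughput, delay in data:
--         used = occupied.get(ctn_a, set()) | occupied.get(ctn_b, set())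
--         g = 0
--         while g in used:
--             g += 1
--         if g == len(independent_link_groups):
--             independent_link_groups.append([])
--         independent_link_groups[g].append((ctn_a, ctn_b, throughput, delay))
--         occupied.setdefault(ctn_a, set()).add(g)
--         occupied.setdefault(ctn_b, set()).add(g)
--     return independent_link_groups
-- ===== Notes on version B (the rewrite author's own statement) =====
-- stated objective: alternative
-- what changed: Replaces A's per-link first-fit scan over per-group container sets with a dict mapping each container to the set of group indices it occupies, placing each link at the mex of the two endpoints' index sets.
import Mathlib
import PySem

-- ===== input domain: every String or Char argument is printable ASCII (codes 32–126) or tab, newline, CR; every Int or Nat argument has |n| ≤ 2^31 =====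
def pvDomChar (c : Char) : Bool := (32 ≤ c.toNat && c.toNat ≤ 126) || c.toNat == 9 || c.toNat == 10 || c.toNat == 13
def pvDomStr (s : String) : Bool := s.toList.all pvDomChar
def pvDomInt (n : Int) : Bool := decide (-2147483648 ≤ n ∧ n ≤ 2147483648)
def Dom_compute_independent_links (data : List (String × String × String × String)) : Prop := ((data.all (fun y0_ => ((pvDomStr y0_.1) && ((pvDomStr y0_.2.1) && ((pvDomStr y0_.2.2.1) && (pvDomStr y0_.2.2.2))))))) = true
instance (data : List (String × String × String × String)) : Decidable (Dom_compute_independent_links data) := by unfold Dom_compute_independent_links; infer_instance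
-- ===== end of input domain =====

-- B replaces A's per-link scan over per-group container SETS by a dict mapping each container to the
-- set of group indices it occupies, placing each link at the mex of the two containers' index sets
-- (objective: alternative data structure; same results, no speed claim).

abbrev LinkT : Type := String × String × String × String

-- ===== PORT A =====
-- inner 'for ctn_grp_id, ctn_group in enumerate(...)' loop: index of the first group containing neither endpoint
def findJoin (a b : String) : List (PySem.Set String) → Option Nat
  | [] => none
  | g :: gs => if a ∈ g ∨ b ∈ g then (findJoin a b gs).map (· + 1) else some 0

def stepA (st : List (PySem.Set String) × List (List LinkT)) (x : LinkT) :
    List (PySem.Set String) × List (List LinkT) :=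
  match x with
  | (a, b, t, d) =>
    match findJoin a b st.1 with
    | some i =>  -- can_join: mutate group i in place, append the link to ilg[i]
        (st.1.modify i (fun g => PySem.Set.add (PySem.Set.add g a) b),
         st.2.modify i (fun l => l ++ [(a, b, t, d)]))
    | none =>    -- create a new group
        (st.1 ++ [PySem.Set.ofList [a, b]], st.2 ++ [[(a, b, t, d)]])

def compute_independent_links (data : List (String × String × String × String)) : List (List (String × String × String × String)) :=
  (data.foldl stepA ([], [])).2

-- ===== PORT B =====
-- 'g = 0; while g in used: g += 1' — fuel |used|+1 always suffices (the loop visits distinct members of used)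
def mexFuel (used : PySem.Set Int) : Nat → Nat → Nat
  | 0, g => g
  | f + 1, g => if (g : Int) ∈ used then mexFuel used f (g + 1) else g

def stepB (st : PySem.Dict String (PySem.Set Int) × List (List LinkT)) (x : LinkT) :
    PySem.Dict String (PySem.Set Int) × List (List LinkT) :=
  match x with
  | (a, b, t, d) =>
    let used := PySem.Set.union (st.1.getD a []) (st.1.getD b [])
    let g := mexFuel used (used.length + 1) 0
    let grps := if g = st.2.length then st.2 ++ [[]] else st.2
    let grps' := grps.modify g (fun l => l ++ [(a, b, t, d)])
    let occ1 := st.1.insert a (PySem.Set.add (st.1.getD a []) (g : Int))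
    let occ2 := occ1.insert b (PySem.Set.add (occ1.getD b []) (g : Int))
    (occ2, grps')

def compute_independent_links_alt (data : List (String × String × String × String)) : List (List (String × String × String × String)) :=
  (data.foldl stepB (PySem.Dict.empty, [])).2

-- ===== PRECONDITION & SPEC =====
def Spec_compute_independent_links (data : List (String × String × String × String)) (out : List (List (String × String × String × String))) : Prop := out = compute_independent_links_alt data
instance (data : List (String × String × String × String)) (out : List (List (String × String × String × String))) : Decidable (Spec_compute_independent_links data out) := by unfold Spec_compute_independent_links; infer_instance

-- ===== CLAIM (what is proved, stated in full; the proofs are below) =====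
def Claim_equal_compute_independent_links : Prop := ∀ (data : List (String × String × String × String)), Dom_compute_independent_links data → Spec_compute_independent_links data (compute_independent_links data)

-- ===== LEMMAS AND PROOFS =====

-- relation between A's list of container sets and B's dict of occupied group indices
def InvCI (ucg : List (PySem.Set String)) (occ : PySem.Dict String (PySem.Set Int)) : Prop :=
  ∀ (c : String) (g : Nat), ((g : Int) ∈ occ.getD c []) ↔ ∃ s, ucg[g]? = some s ∧ c ∈ s

theorem mexFuel_eq (used : PySem.Set Int) (k : Nat) (hk : (k : Int) ∉ used)
    (hlt : ∀ i < k, (i : Int) ∈ used) :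
    ∀ (f g : Nat), g ≤ k → k ≤ g + f → mexFuel used f g = k := by
  intro f
  induction f with
  | zero => intro g h1 h2; simp [mexFuel]; omega
  | succ f ih =>
      intro g h1 h2
      simp only [mexFuel]
      by_cases hg : (g : Int) ∈ used
      · simp only [if_pos hg]
        have : g ≠ k := fun h => hk (h ▸ hg)
        exact ih (g + 1) (by omega) (by omega)
      · simp only [if_neg hg]
        by_contra hne
        exact hg (hlt g (by omega))

theorem consec_le_length (used : PySem.Set Int) (k : Nat)
    (hlt : ∀ i < k, (i : Int) ∈ used) : k ≤ used.length := by
  have hsub : ((List.range k).map (Int.ofNat)) ⊆ used := by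
    intro x hx
    obtain ⟨i, hi, rfl⟩ := List.mem_map.mp hx
    exact hlt i (List.mem_range.mp hi)
  have hndm : ((List.range k).map (Int.ofNat)).Nodup :=
    (List.nodup_range).map (fun _ _ h => Int.ofNat_inj.mp h)
  calc k = ((List.range k).map (Int.ofNat)).length := by simp
    _ = ((List.range k).map (Int.ofNat)).toFinset.card := (List.toFinset_card_of_nodup hndm).symm
    _ ≤ used.toFinset.card := Finset.card_le_card (fun x hx => by
        simp only [List.mem_toFinset] at *; exact hsub hx)
    _ ≤ used.length := used.toFinset_card_le

theorem findJoin_some (a b : String) :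
    ∀ (ucg : List (PySem.Set String)) (i : Nat), findJoin a b ucg = some i →
      i < ucg.length ∧ (∀ s, ucg[i]? = some s → ¬(a ∈ s ∨ b ∈ s)) ∧
      (∀ j < i, ∀ s, ucg[j]? = some s → (a ∈ s ∨ b ∈ s)) := by
  intro ucg
  induction ucg with
  | nil => intro i h; simp [findJoin] at h
  | cons g gs ih =>
      intro i h
      simp only [findJoin] at h
      by_cases hg : a ∈ g ∨ b ∈ g
      · rw [if_pos hg] at h
        obtain ⟨i', hi', rfl⟩ := Option.map_eq_some_iff.mp h
        obtain ⟨h1, h2, h3⟩ := ih i' hi'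
        refine ⟨by simpa using h1, ?_, ?_⟩
        · intro s hs; simpa using h2 s (by simpa using hs)
        · intro j hj s hs
          match j with
          | 0 => simp at hs; exact hs ▸ hg
          | j' + 1 => exact h3 j' (by omega) s (by simpa using hs)
      · rw [if_neg hg] at h
        obtain rfl : i = 0 := by simpa using h.symm
        exact ⟨by simp, fun s hs => by simp at hs; exact hs ▸ hg, fun j hj => by omega⟩

theorem findJoin_none (a b : String) :
    ∀ (ucg : List (PySem.Set String)), findJoin a b ucg = none →
      ∀ (j : Nat) (s : PySem.Set String), ucg[j]? = some s → (a ∈ s ∨ b ∈ s) := by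
  intro ucg
  induction ucg with
  | nil => intro _ j s hs; simp at hs
  | cons g gs ih =>
      intro h j s hs
      simp only [findJoin] at h
      by_cases hg : a ∈ g ∨ b ∈ g
      · rw [if_pos hg] at h
        match j with
        | 0 => simp at hs; exact hs ▸ hg
        | j' + 1 => exact ih (Option.map_eq_none_iff.mp h) j' s (by simpa using hs)
      · rw [if_neg hg] at h; simp at h

theorem modify_append_length {α : Type} (l : List α) (y : α) (f : α → α) :
    (l ++ [y]).modify l.length f = l ++ [f y] := by
  induction l with
  | nil => simp [List.modify]
  | cons x xs ih => simpa [List.modify] using ih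

theorem getD_two_insert (occ : PySem.Dict String (PySem.Set Int)) (a b c : String)
    (k g : Nat) :
    ((g : Int) ∈ ((occ.insert a (PySem.Set.add (occ.getD a []) (k : Int))).insert b
        (PySem.Set.add ((occ.insert a (PySem.Set.add (occ.getD a []) (k : Int))).getD b []) (k : Int))).getD c []) ↔
    ((g : Int) ∈ occ.getD c [] ∨ ((c = a ∨ c = b) ∧ g = k)) := by
  simp only [PySem.Dict.getD_insert]
  split_ifs with h1 h2 h3
  all_goals subst_vars
  all_goals try simp only [PySem.Set.mem_add, Nat.cast_inj]
  all_goals tauto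

theorem step_rel (ucg : List (PySem.Set String)) (occ : PySem.Dict String (PySem.Set Int))
    (ilg : List (List LinkT)) (hInv : InvCI ucg occ) (hlen : ucg.length = ilg.length) (x : LinkT) :
    InvCI (stepA (ucg, ilg) x).1 (stepB (occ, ilg) x).1 ∧
    (stepA (ucg, ilg) x).1.length = (stepA (ucg, ilg) x).2.length ∧
    (stepA (ucg, ilg) x).2 = (stepB (occ, ilg) x).2 := by
  obtain ⟨a, b, t, d⟩ := x
  have memUsed : ∀ g : Nat, ((g : Int) ∈ PySem.Set.union (occ.getD a []) (occ.getD b [])) ↔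
      ∃ s, ucg[g]? = some s ∧ (a ∈ s ∨ b ∈ s) := by
    intro g
    rw [PySem.Set.mem_union]
    constructor
    · rintro (h | h)
      · obtain ⟨s, hs, hm⟩ := (hInv a g).1 h; exact ⟨s, hs, Or.inl hm⟩
      · obtain ⟨s, hs, hm⟩ := (hInv b g).1 h; exact ⟨s, hs, Or.inr hm⟩
    · rintro ⟨s, hs, hm | hm⟩
      · exact Or.inl ((hInv a g).2 ⟨s, hs, hm⟩)
      · exact Or.inr ((hInv b g).2 ⟨s, hs, hm⟩)
  have hold_lt : ∀ (c : String) (g : Nat), (g : Int) ∈ occ.getD c [] → g < ucg.length := by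
    intro c g h
    obtain ⟨s, hs, _⟩ := (hInv c g).1 h
    exact (List.getElem?_eq_some_iff.mp hs).1
  cases hfj : findJoin a b ucg with
  | some i =>
      obtain ⟨h1, h2, h3⟩ := findJoin_some a b ucg i hfj
      have hsi : ucg[i]? = some ucg[i] := List.getElem?_eq_getElem h1
      have hknot : ((i : Int)) ∉ PySem.Set.union (occ.getD a []) (occ.getD b []) := by
        intro hmem
        obtain ⟨s, hs, hm⟩ := (memUsed i).1 hmem
        exact h2 s hs hm
      have hkall : ∀ j < i, ((j : Int)) ∈ PySem.Set.union (occ.getD a []) (occ.getD b []) := by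
        intro j hj
        have hjlt : j < ucg.length := lt_trans hj h1
        exact (memUsed j).2 ⟨ucg[j], List.getElem?_eq_getElem hjlt,
          h3 j hj ucg[j] (List.getElem?_eq_getElem hjlt)⟩
      have hmex : mexFuel (PySem.Set.union (occ.getD a []) (occ.getD b []))
          ((PySem.Set.union (occ.getD a []) (occ.getD b [])).length + 1) 0 = i :=
        mexFuel_eq _ i hknot hkall _ 0 (Nat.zero_le _)
          (by have := consec_le_length _ i hkall; omega)
      simp only [stepA, stepB, hfj]
      rw [hmex]
      have hine : ¬ (i = ilg.length) := by omega
      rw [if_neg hine]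
      refine ⟨?_, by simp [hlen], rfl⟩
      intro c g
      rw [getD_two_insert, List.getElem?_modify]
      by_cases hgi : g = i
      · subst hgi
        rw [hsi]
        have hmemold : ((g : Int) ∈ occ.getD c []) ↔ c ∈ ucg[g] := by
          rw [hInv c g, hsi]; simp
        simp [PySem.Set.mem_add, hmemold]
        tauto
      · have hig : ¬ (i = g) := fun h => hgi h.symm
        have hmap : ∀ (o : Option (PySem.Set String)) (f : PySem.Set String → PySem.Set String),
            ((fun s => if i = g then f s else s) <$> o) = o := by
          intro o f; cases o <;> simp [hig]
        rw [hmap, hInv c g]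
        constructor
        · rintro (h | ⟨_, h⟩)
          · exact h
          · exact absurd h hgi
        · intro h; exact Or.inl h
  | none =>
      have hall := findJoin_none a b ucg hfj
      have hknot : ((ucg.length : Int)) ∉ PySem.Set.union (occ.getD a []) (occ.getD b []) := by
        intro hmem
        obtain ⟨s, hs, _⟩ := (memUsed ucg.length).1 hmem
        simp at hs
      have hkall : ∀ j < ucg.length, ((j : Int)) ∈ PySem.Set.union (occ.getD a []) (occ.getD b []) := by
        intro j hj
        exact (memUsed j).2 ⟨ucg[j], List.getElem?_eq_getElem hj,
          hall j ucg[j] (List.getElem?_eq_getElem hj)⟩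
      have hmex : mexFuel (PySem.Set.union (occ.getD a []) (occ.getD b []))
          ((PySem.Set.union (occ.getD a []) (occ.getD b [])).length + 1) 0 = ucg.length :=
        mexFuel_eq _ ucg.length hknot hkall _ 0 (Nat.zero_le _)
          (by have := consec_le_length _ ucg.length hkall; omega)
      simp only [stepA, stepB, hfj]
      rw [hmex, hlen, if_pos rfl]
      refine ⟨?_, by simp [hlen], by rw [modify_append_length]; simp⟩
      intro c g
      rw [← hlen, getD_two_insert]
      rcases lt_trichotomy g ucg.length with hg | hg | hg
      · rw [List.getElem?_append_left hg]
        constructor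
        · rintro (hmem | ⟨_, hc⟩)
          · exact (hInv c g).1 hmem
          · omega
        · intro h; exact Or.inl ((hInv c g).2 h)
      · subst hg
        rw [List.getElem?_concat_length]
        constructor
        · rintro (hmem | ⟨hc, _⟩)
          · exact absurd (hold_lt c _ hmem) (lt_irrefl _)
          · exact ⟨PySem.Set.ofList [a, b], rfl, by rw [PySem.Set.mem_ofList]; simpa using hc⟩
        · rintro ⟨s, hs, hm⟩
          obtain rfl : PySem.Set.ofList [a, b] = s := by injection hs
          rw [PySem.Set.mem_ofList] at hm
          simp at hm
          exact Or.inr ⟨hm, rfl⟩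
      · have hnone : (ucg ++ [PySem.Set.ofList [a, b]])[g]? = none := by
          rw [List.getElem?_eq_none_iff]; simp; omega
        rw [hnone]
        constructor
        · rintro (hmem | ⟨_, hc⟩)
          · exact absurd (hold_lt c g hmem) (by omega)
          · omega
        · rintro ⟨s, hs, _⟩; simp at hs

theorem foldl_rel : ∀ (data : List LinkT) (ucg : List (PySem.Set String))
    (occ : PySem.Dict String (PySem.Set Int)) (ilg : List (List LinkT)),
    InvCI ucg occ → ucg.length = ilg.length →
    (data.foldl stepA (ucg, ilg)).2 = (data.foldl stepB (occ, ilg)).2 := by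
  intro data
  induction data with
  | nil => intro _ _ _ _ _; rfl
  | cons x xs ih =>
      intro ucg occ ilg hInv hlen
      obtain ⟨hInv', hlen', hgrp⟩ := step_rel ucg occ ilg hInv hlen x
      simp only [List.foldl_cons]
      have hA : stepA (ucg, ilg) x = ((stepA (ucg, ilg) x).1, (stepA (ucg, ilg) x).2) := rfl
      have hB : stepB (occ, ilg) x = ((stepB (occ, ilg) x).1, (stepB (occ, ilg) x).2) := rfl
      rw [hA, hB, ← hgrp]
      exact ih _ _ _ hInv' (hlen' )

theorem InvCI_init : InvCI [] PySem.Dict.empty := by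
  intro c g; simp [PySem.Dict.getD_empty]

-- ===== VERDICT (by name: the statement is the Claim_ definition above) =====
theorem compute_independent_links_spec : Claim_equal_compute_independent_links := by
  intro data _
  unfold Spec_compute_independent_links compute_independent_links compute_independent_links_alt
  exact foldl_rel data [] PySem.Dict.empty [] InvCI_init rfl
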